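-- pv_equiv track=rewrite | github.com/J430N/WP2C | tools/aircrack.py | _hex_and_ascii_key
-- ===== SOURCE A (Python) =====
-- def _hex_and_ascii_key(hex_raw):
--     hex_chars = []
--     ascii_key = ''
--     for index in range(0, len(hex_raw), 2):
--         byt = hex_raw[index:index + 2]
--         hex_chars.append(byt)
--         byt_int = int(byt, 16)
--         if byt_int < 32 or byt_int > 127 or ascii_key is None:
--             ascii_key = None  # Not printable
--         else:
--             ascii_key += chr(byt_int)
--
--     hex_key = ':'.join(hex_chars)
--
--     return hex_key, ascii_key
-- ===== SOURCE B (Python) =====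
-- def _hex_and_ascii_key(hex_raw):
--     chunks = [hex_raw[i:i + 2] for i in range(0, len(hex_raw), 2)]
--     hex_key = ':'.join(chunks)
--     vals = [int(c, 16) for c in chunks]
--     if all(32 <= v <= 127 for v in vals):
--         ascii_key = ''.join(chr(v) for v in vals)
--     else:
--         ascii_key = None
--     return hex_key, ascii_key
-- ===== Notes on version B (the rewrite author's own statement) =====
-- stated objective: simpler
-- what changed: Replaced the fused single-pass loop with a sticky-None accumulator by separate passes: build the chunk list once and join it, decode all chunks to ints, decide printability with a single all(32 <= v <= 127) predicate, and only then build the ASCII key (or None).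
import Mathlib
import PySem

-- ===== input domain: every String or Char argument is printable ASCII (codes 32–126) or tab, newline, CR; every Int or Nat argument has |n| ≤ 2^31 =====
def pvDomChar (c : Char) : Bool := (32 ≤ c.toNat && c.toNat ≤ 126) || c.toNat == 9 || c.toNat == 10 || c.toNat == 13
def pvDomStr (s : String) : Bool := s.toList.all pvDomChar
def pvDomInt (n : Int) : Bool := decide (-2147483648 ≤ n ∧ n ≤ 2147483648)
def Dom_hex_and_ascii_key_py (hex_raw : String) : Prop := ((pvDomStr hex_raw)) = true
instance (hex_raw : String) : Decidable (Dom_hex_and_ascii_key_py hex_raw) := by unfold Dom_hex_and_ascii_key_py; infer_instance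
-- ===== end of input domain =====

-- B splits the work into separate passes (chunk list + join, int list, an all-printable predicate, then the
-- ASCII join) instead of A's fused loop with a sticky-None accumulator; same O(n) cost, simpler structure.

-- ===== PORT A =====
-- One iteration of A's loop body; `none` = the ValueError of int(byt, 16) propagating out of the loop.
def pvStepA (l : List Char) (st : List (List Char) × Option (List Char)) (index : Int) :
    Option (List (List Char) × Option (List Char)) :=
  let byt := PySem.List.slice l (some index) (some (index + 2))
  match PySem.Int.ofCharsBase? byt 16 with
  | none => none
  | some b =>
      if b < 32 ∨ 127 < b ∨ st.2 = none then some (st.1 ++ [byt], none)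
      else some (st.1 ++ [byt], some (st.2.getD [] ++ [Char.ofNat b.toNat]))

def hex_and_ascii_key_py (hex_raw : String) : String × Option String :=
  let l := hex_raw.toList
  match (PySem.List.pyRange 0 (l.length : Int) 2).foldl
      (fun st? index => st?.bind (fun st => pvStepA l st index)) (some ([], some [])) with
  | none => ("", none)  -- Python raises ValueError here; excluded by Pre_
  | some (hex_chars, ascii_key) =>
      (String.ofList (PySem.Chars.join [':'] hex_chars), ascii_key.map String.ofList)

-- ===== PORT B =====
def hex_and_ascii_key_py_alt (hex_raw : String) : String × Option String :=
  let l := hex_raw.toList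
  let chunks := (PySem.List.pyRange 0 (l.length : Int) 2).map
      (fun i => PySem.List.slice l (some i) (some (i + 2)))
  let hexKey := String.ofList (PySem.Chars.join [':'] chunks)
  match chunks.mapM (fun c => PySem.Int.ofCharsBase? c 16) with
  | none => ("", none)  -- Python raises ValueError here; excluded by Pre_
  | some vals =>
      if vals.all (fun v => decide (32 ≤ v) && decide (v ≤ 127)) then
        (hexKey, some (String.ofList (vals.map (fun v => Char.ofNat v.toNat))))
      else (hexKey, none)

-- ===== PRECONDITION & SPEC =====
-- The 2-character chunks of hex_raw (Pre_'s own simple pairing recursion, no port code).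
def pvChunks2 : List Char → List (List Char)
  | [] => []
  | [c] => [[c]]
  | c1 :: c2 :: rest => [c1, c2] :: pvChunks2 rest

-- Pre_: every 2-character chunk of hex_raw is a valid int(·, 16) literal — exactly the inputs on
-- which A returns normally (on any other chunk int(byt, 16) raises ValueError).
def Pre_hex_and_ascii_key_py (hex_raw : String) : Prop :=
  (pvChunks2 hex_raw.toList).all (fun c => (PySem.Int.ofCharsBase? c 16).isSome) = true
instance (hex_raw : String) : Decidable (Pre_hex_and_ascii_key_py hex_raw) := by
  unfold Pre_hex_and_ascii_key_py; infer_instance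

def pvWitness_hex_and_ascii_key_py : String := "7e20"

def Spec_hex_and_ascii_key_py (hex_raw : String) (out : String × Option String) : Prop :=
  out = hex_and_ascii_key_py_alt hex_raw
instance (hex_raw : String) (out : String × Option String) : Decidable (Spec_hex_and_ascii_key_py hex_raw out) := by
  unfold Spec_hex_and_ascii_key_py; infer_instance

-- ===== CLAIM (what is proved, stated in full; the proofs are below) =====
def Claim_equal_hex_and_ascii_key_py : Prop :=
  ∀ (hex_raw : String), Dom_hex_and_ascii_key_py hex_raw → Pre_hex_and_ascii_key_py hex_raw →
    Spec_hex_and_ascii_key_py hex_raw (hex_and_ascii_key_py hex_raw)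

-- ===== LEMMAS AND PROOFS =====

-- range(0, n+2, 2) unrolls to 0 followed by range(0, n, 2) shifted by 2.
theorem pvRange2_cons (n : Nat) :
    PySem.List.pyRange 0 ((n : Int) + 2) 2 = 0 :: (PySem.List.pyRange 0 (n : Int) 2).map (· + 2) := by
  rw [PySem.List.pyRange_of_pos _ _ (show (0:Int) < 2 by norm_num),
      PySem.List.pyRange_of_pos _ _ (show (0:Int) < 2 by norm_num)]
  have h1 : ((0 : Int) < (n : Int) + 2) := by positivity
  simp only [h1, if_true]
  by_cases hn : (0 : Int) < (n : Int)
  · simp only [hn, if_true]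
    have hc : (((n : Int) + 2 - 0 + 2 - 1) / 2).toNat = (((n : Int) - 0 + 2 - 1) / 2).toNat + 1 := by
      omega
    rw [hc, List.range_succ_eq_map]
    simp only [List.map_cons, List.map_map, List.cons.injEq]
    refine ⟨by ring, ?_⟩
    apply List.map_congr_left; intro k _; simp only [Function.comp_apply]; push_cast; ring
  · have hn0 : n = 0 := by omega
    subst hn0
    norm_num

theorem pvRange01 : PySem.List.pyRange 0 1 2 = [0] := by decide

theorem pvSlice_single (c : Char) : PySem.List.slice [c] (some 0) (some (0 + 2)) = [c] := by
  rw [PySem.List.slice_toNat _ le_rfl (by norm_num)]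
  rfl

-- slicing two past the head pair is slicing the tail.
theorem pvSlice_shift (x y : Char) (l : List Char) (i : Int) (hi : 0 ≤ i) :
    PySem.List.slice (x :: y :: l) (some (i + 2)) (some (i + 2 + 2)) =
      PySem.List.slice l (some i) (some (i + 2)) := by
  rw [PySem.List.slice_toNat _ (by omega) (by omega), PySem.List.slice_toNat _ hi (by omega)]
  have h2 : (i + 2).toNat = i.toNat + 2 := by omega
  have h4 : (i + 2 + 2).toNat = i.toNat + 2 + 2 := by omega
  rw [h2, h4]
  simp [List.drop_succ_cons]

-- A fold whose step is an Option.bind stays none.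
theorem pvFold_none {α β : Type} (f : α → β → Option α) (xs : List β) :
    xs.foldl (fun st? x => st?.bind (fun st => f st x)) none = none := by
  induction xs with
  | nil => rfl
  | cons x xs ih => simpa using ih

-- A's ascii accumulator, isolated: the sticky-None fold over the decoded byte values.
def pvSticky (ak : Option (List Char)) (vals : List Int) : Option (List Char) :=
  vals.foldl
    (fun a v => if v < 32 ∨ 127 < v ∨ a = none then none else some (a.getD [] ++ [Char.ofNat v.toNat])) ak

theorem pvSticky_none (vals : List Int) : pvSticky none vals = none := by
  induction vals with
  | nil => rfl
  | cons v vs ih => simpa [pvSticky] using ih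

theorem pvSticky_some (vals : List Int) : ∀ (s : List Char),
    pvSticky (some s) vals =
      if vals.all (fun v => decide (32 ≤ v) && decide (v ≤ 127)) then
        some (s ++ vals.map (fun v => Char.ofNat v.toNat))
      else none := by
  induction vals with
  | nil => intro s; simp [pvSticky]
  | cons v vs ih =>
      intro s
      by_cases hv : v < 32 ∨ 127 < v
      · have hb : ((decide (32 ≤ v) && decide (v ≤ 127)) = false) := by
          rcases hv with h | h <;> simp <;> omega
        simp only [pvSticky, List.foldl_cons, if_pos (by tauto : v < 32 ∨ 127 < v ∨ (some s : Option (List Char)) = none), hb, Bool.false_and, List.all_cons]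
        simpa [pvSticky] using pvSticky_none vs
      · have hb : ((decide (32 ≤ v) && decide (v ≤ 127)) = true) := by
          rw [not_or] at hv; simp; omega
        have hstep := ih (s ++ [Char.ofNat v.toNat])
        simp only [pvSticky] at hstep ⊢
        simp [hv, hb, hstep]

-- B's chunk comprehension computes the pairing pvChunks2.
theorem pvChunks_eq (l : List Char) :
    (PySem.List.pyRange 0 (l.length : Int) 2).map
        (fun i => PySem.List.slice l (some i) (some (i + 2))) = pvChunks2 l := by
  induction l using pvChunks2.induct with
  | case1 => simp [PySem.List.pyRange_of_pos _ _ (show (0:Int) < 2 by norm_num), pvChunks2]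
  | case2 c =>
      simp only [List.length_singleton, Nat.cast_one, pvRange01, List.map_cons, List.map_nil]
      rw [pvSlice_single c]
      rfl
  | case3 c1 c2 rest ih =>
      have hlen : ((c1 :: c2 :: rest).length : Int) = (rest.length : Int) + 2 := by
        simp; omega
      rw [hlen, pvRange2_cons, List.map_cons, List.map_map]
      have h0 : PySem.List.slice (c1 :: c2 :: rest) (some 0) (some (0 + 2)) = [c1, c2] := by
        rw [PySem.List.slice_toNat _ (by norm_num) (by norm_num)]; rfl
      rw [h0]
      simp only [pvChunks2, List.cons.injEq, true_and]
      rw [← ih]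
      apply List.map_congr_left
      intro i hi
      have h0i : 0 ≤ i := by
        rcases (PySem.List.mem_pyRange_iff_of_pos (by norm_num) i).mp hi with ⟨h, _⟩
        exact h
      simpa using pvSlice_shift c1 c2 rest i h0i

-- pvStepA on the extended list at a shifted index is pvStepA on the tail.
theorem pvStepA_shift (c1 c2 : Char) (rest : List Char)
    (st : List (List Char) × Option (List Char)) (i : Int) (hi : 0 ≤ i) :
    pvStepA (c1 :: c2 :: rest) st (i + 2) = pvStepA rest st i := by
  unfold pvStepA
  rw [pvSlice_shift c1 c2 rest i hi]

-- The main invariant: A's loop over range(0, len, 2), started at (acc, ak), computes the chunk list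
-- and the sticky fold of the decoded values — or none exactly when some chunk fails to parse.
theorem pvFoldA_eq (l : List Char) : ∀ (acc : List (List Char)) (ak : Option (List Char)),
    (PySem.List.pyRange 0 (l.length : Int) 2).foldl
        (fun st? index => st?.bind (fun st => pvStepA l st index)) (some (acc, ak)) =
      match (pvChunks2 l).mapM (fun c => PySem.Int.ofCharsBase? c 16) with
      | none => none
      | some vals => some (acc ++ pvChunks2 l, pvSticky ak vals) := by
  induction l using pvChunks2.induct with
  | case1 =>
      intro acc ak
      simp [PySem.List.pyRange_of_pos _ _ (show (0:Int) < 2 by norm_num), pvChunks2, pvSticky]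
  | case2 c =>
      intro acc ak
      have hr : (([c].length : Nat) : Int) = (1 : Int) := by norm_num
      rw [hr, pvRange01]
      have hb : PySem.List.slice [c] (some 0) (some (0 + 2)) = [c] := pvSlice_single c
      simp only [List.foldl_cons, List.foldl_nil, Option.bind_some, pvStepA, hb, pvChunks2]
      cases h : PySem.Int.ofCharsBase? [c] 16 with
      | none => simp [List.mapM_cons, h]
      | some b =>
          simp only [List.mapM_cons, h, List.mapM_nil, pvSticky]
          split_ifs with hc
          · simp
            intro h1 h2
            rcases hc with hx | hx | hx
            · omega
            · omega
            · exact hx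
          · simp
            rw [not_or, not_or] at hc
            exact ⟨by omega, by omega, hc.2.2⟩
  | case3 c1 c2 rest ih =>
      intro acc ak
      have hlen : (((c1 :: c2 :: rest).length : Nat) : Int) = (rest.length : Int) + 2 := by
        simp; omega
      rw [hlen, pvRange2_cons, List.foldl_cons, List.foldl_map]
      have h0 : PySem.List.slice (c1 :: c2 :: rest) (some 0) (some (0 + 2)) = [c1, c2] := by
        rw [PySem.List.slice_toNat _ (by norm_num) (by norm_num)]; rfl
      have hfc := PySem.List.foldl_congr_mem (PySem.List.pyRange 0 (rest.length : Int) 2)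
        (fun s i => s.bind (fun st => pvStepA (c1 :: c2 :: rest) st (i + 2)))
        (fun s i => s.bind (fun st => pvStepA rest st i))
        ((some (acc, ak)).bind (fun st => pvStepA (c1 :: c2 :: rest) st 0))
        (by
          intro s i hi
          have h0i : 0 ≤ i := ((PySem.List.mem_pyRange_iff_of_pos (by norm_num) i).mp hi).1
          show s.bind (fun st => pvStepA (c1 :: c2 :: rest) st (i + 2)) =
            s.bind (fun st => pvStepA rest st i)
          rw [funext (fun st => pvStepA_shift c1 c2 rest st i h0i)])
      rw [hfc]
      have hstep : (some (acc, ak)).bind (fun st => pvStepA (c1 :: c2 :: rest) st 0) =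
          match PySem.Int.ofCharsBase? [c1, c2] 16 with
          | none => none
          | some b =>
              if b < 32 ∨ 127 < b ∨ ak = none then some (acc ++ [[c1, c2]], none)
              else some (acc ++ [[c1, c2]], some (ak.getD [] ++ [Char.ofNat b.toNat])) := by
        simp only [Option.bind_some, pvStepA, h0]
      rw [hstep]
      cases h : PySem.Int.ofCharsBase? [c1, c2] 16 with
      | none =>
          simp only [pvChunks2, List.mapM_cons, h]
          simpa using pvFold_none (pvStepA rest) (PySem.List.pyRange 0 (rest.length : Int) 2)
      | some b =>
          simp only [pvChunks2, List.mapM_cons, h]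
          by_cases hcond : b < 32 ∨ 127 < b ∨ ak = none
          · rw [if_pos hcond, ih]
            cases hrest : (pvChunks2 rest).mapM (fun c => PySem.Int.ofCharsBase? c 16) with
            | none => simp
            | some vals =>
                have hs : pvSticky ak (b :: vals) = none := by
                  simp only [pvSticky, List.foldl_cons, if_pos hcond]
                  simpa [pvSticky] using pvSticky_none vals
                have hs' : pvSticky none vals = none := pvSticky_none vals
                simp [hs, hs', List.append_assoc]
          · rw [if_neg hcond, ih]
            cases hrest : (pvChunks2 rest).mapM (fun c => PySem.Int.ofCharsBase? c 16) with
            | none => simp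
            | some vals =>
                have hs : pvSticky ak (b :: vals) =
                    pvSticky (some (ak.getD [] ++ [Char.ofNat b.toNat])) vals := by
                  simp only [pvSticky, List.foldl_cons, if_neg hcond]
                simp [hs, List.append_assoc]

-- Pre_ gives a successful decode of every chunk.
theorem pvMapM_some {α β : Type} (f : α → Option β) (cs : List α)
    (h : cs.all (fun c => (f c).isSome) = true) : ∃ vals, cs.mapM f = some vals := by
  induction cs with
  | nil => exact ⟨[], rfl⟩
  | cons c cs ih =>
      simp only [List.all_cons, Bool.and_eq_true] at h
      obtain ⟨b, hb⟩ := Option.isSome_iff_exists.mp h.1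
      obtain ⟨vals, hv⟩ := ih h.2
      exact ⟨b :: vals, by simp [List.mapM_cons, hb, hv]⟩

-- ===== VERDICT (by name: the statement is the Claim_ definition above) =====
theorem hex_and_ascii_key_py_spec : Claim_equal_hex_and_ascii_key_py := by
  intro hex_raw _ hpre
  unfold Spec_hex_and_ascii_key_py hex_and_ascii_key_py hex_and_ascii_key_py_alt
  simp only [pvChunks_eq, pvFoldA_eq]
  obtain ⟨vals, hm⟩ := pvMapM_some (fun c => PySem.Int.ofCharsBase? c 16) (pvChunks2 hex_raw.toList) hpre
  rw [hm]
  simp only [List.nil_append, pvSticky_some]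
  by_cases hall : vals.all (fun v => decide (32 ≤ v) && decide (v ≤ 127)) = true
  · simp [hall]
  · simp [hall]
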